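-- pv_equiv track=rewrite | github.com/elvax/AdventOfCode2018-solutions | 2018/day02.py | part1
-- ===== SOURCE A (Python) =====
-- from collections import Counter
--
-- def part1(data):
--     twos = 0
--     threes = 0
--     for entry in data.split():
--         counter = Counter(entry)
--         if 3 in counter.values():
--             threes += 1
--         if 2 in counter.values():
--             twos += 1
--
--     return twos * threes
-- ===== SOURCE B (Python) =====
-- def part1(data):
--     twos = 0
--     threes = 0
--     for entry in data.split():
--         s = sorted(entry)
--         n = len(s)
--         lengths = set()
--         i = 0
--         while i < n:
--             j = i + 1
--             while j < n and s[j] == s[i]: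
--                 j += 1
--             lengths.add(j - i)
--             i = j
--         if 2 in lengths:
--             twos += 1
--         if 3 in lengths:
--             threes += 1
--     return twos * threes
-- ===== Notes on version B (the rewrite author's own statement) =====
-- stated objective: alternative
-- what changed: Per word, letter frequencies are obtained by sorting the word and scanning maximal runs of equal characters (collecting run lengths into a set) instead of hashing into a collections.Counter and testing its values.
import Mathlib
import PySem

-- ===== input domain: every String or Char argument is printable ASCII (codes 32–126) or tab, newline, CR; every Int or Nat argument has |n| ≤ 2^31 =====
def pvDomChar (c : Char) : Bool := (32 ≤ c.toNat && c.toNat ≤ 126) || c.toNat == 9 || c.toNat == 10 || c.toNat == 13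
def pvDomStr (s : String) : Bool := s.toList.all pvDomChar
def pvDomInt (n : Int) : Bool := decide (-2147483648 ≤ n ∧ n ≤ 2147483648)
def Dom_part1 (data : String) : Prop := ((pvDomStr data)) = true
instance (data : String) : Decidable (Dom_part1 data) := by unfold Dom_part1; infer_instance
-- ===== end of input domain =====

-- B replaces the per-word Counter hash count with a sort-then-scan: sort the word's
-- letters and collect the lengths of maximal equal runs into a set (objective: alternative).

-- ===== PORT A =====
def part1 (data : String) : Int :=
  let r := (PySem.Str.split₀ data).foldl (fun (st : Int × Int) entry =>
    let counter := PySem.Dict.counter entry.toList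
    let st1 := if (3 : Int) ∈ counter.values then (st.1, st.2 + 1) else st
    let st2 := if (2 : Int) ∈ counter.values then (st1.1 + 1, st1.2) else st1
    st2) (0, 0)
  r.1 * r.2

-- ===== PORT B =====
-- the inner while loops of Source B: left-to-right scan of the sorted word, collecting
-- the length of each maximal run of equal characters
def runLensGo (c : Char) (k : Nat) : List Char → List Nat
  | [] => [k]
  | d :: rest => if d = c then runLensGo c (k + 1) rest else k :: runLensGo d 1 rest

def runLens : List Char → List Nat
  | [] => []
  | c :: rest => runLensGo c 1 rest

def part1_alt (data : String) : Int :=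
  let r := (PySem.Str.split₀ data).foldl (fun (st : Int × Int) entry =>
    let s := PySem.List.sorted entry.toList id
    let lengths := PySem.Set.ofList (runLens s)
    let tw := if 2 ∈ lengths then st.1 + 1 else st.1
    let th := if 3 ∈ lengths then st.2 + 1 else st.2
    (tw, th)) (0, 0)
  r.1 * r.2

-- ===== PRECONDITION & SPEC =====
def Spec_part1 (data : String) (out : Int) : Prop := out = part1_alt data
instance (data : String) (out : Int) : Decidable (Spec_part1 data out) := by unfold Spec_part1; infer_instance

-- ===== CLAIM (what is proved, stated in full; the proofs are below) =====
def Claim_equal_part1 : Prop := ∀ (data : String), Dom_part1 data → Spec_part1 data (part1 data)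

-- ===== LEMMAS AND PROOFS =====

-- A value n sits in the Counter's values iff some character of the word occurs n times.
lemma counter_values_mem (l : List Char) (n : Nat) :
    ((n : Int) ∈ (PySem.Dict.counter l).values) ↔ ∃ c ∈ l, l.count c = n := by
  simp only [PySem.Dict.values, PySem.Dict.items_counter, List.map_map, List.mem_map,
    PySem.Set.mem_ofList, Function.comp_apply, Nat.cast_inj]

-- membership in the run lengths of a sorted list: n is a run length iff it is
-- k + (count of the current run's char in the remainder), or a count of a later, different char
lemma go_mem (rest : List Char) : ∀ (c : Char) (k n : Nat), (c :: rest).Pairwise (· ≤ ·) →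
    (n ∈ runLensGo c k rest ↔ (n = k + rest.count c) ∨ (∃ d ∈ rest, d ≠ c ∧ n = rest.count d)) := by
  induction rest with
  | nil => intro c k n _; simp [runLensGo]
  | cons d rest' ih =>
    intro c k n hp
    rcases List.pairwise_cons.mp hp with ⟨hc, hp'⟩
    rcases List.pairwise_cons.mp hp' with ⟨hd, hp''⟩
    by_cases hdc : d = c
    · subst hdc
      rw [runLensGo, if_pos rfl]
      rw [ih d (k + 1) n hp']
      constructor
      · rintro (h | ⟨e, he, hne, h⟩)
        · left; simp [List.count_cons]; omega
        · right; exact ⟨e, List.mem_cons_of_mem _ he, hne,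
            by simp [List.count_cons, hne, Ne.symm hne, h]⟩
      · rintro (h | ⟨e, he, hne, h⟩)
        · left; simp [List.count_cons] at h; omega
        · right
          rcases List.mem_cons.mp he with rfl | he'
          · exact absurd rfl hne
          · exact ⟨e, he', hne, by simp [List.count_cons, hne, Ne.symm hne] at h; exact h⟩
    · have hcnot : c ∉ d :: rest' := by
        intro hmem
        rcases List.mem_cons.mp hmem with rfl | hmem'
        · exact hdc rfl
        · exact hdc (le_antisymm (hd c hmem') (hc d List.mem_cons_self))
      rw [runLensGo, if_neg hdc]
      rw [List.mem_cons, ih d 1 n hp']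
      have hcc : (d :: rest').count c = 0 := List.count_eq_zero.mpr hcnot
      have hcd : c ∉ rest' := fun h => hcnot (List.mem_cons_of_mem _ h)
      constructor
      · rintro (rfl | h | ⟨e, he, hne, h⟩)
        · left; omega
        · right; exact ⟨d, List.mem_cons_self, hdc, by simp [List.count_cons, h, Nat.add_comm]⟩
        · right
          refine ⟨e, List.mem_cons_of_mem _ he, fun hec => hcd (hec ▸ he), ?_⟩
          simp [List.count_cons, hne, Ne.symm hne, h]
      · rintro (h | ⟨e, he, hne, h⟩)
        · left; omega
        · rcases List.mem_cons.mp he with rfl | he'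
          · right; left; simp [List.count_cons] at h; omega
          · by_cases hed : e = d
            · subst hed; right; left; simp [List.count_cons] at h; omega
            · right; right
              exact ⟨e, he', hed, by simp [List.count_cons, hed, Ne.symm hed] at h; exact h⟩

-- n is a run length of the sorted word iff some character of the word occurs n times
lemma runLens_mem (l : List Char) (n : Nat) :
    n ∈ runLens (PySem.List.sorted l id) ↔ ∃ c ∈ l, l.count c = n := by
  have hperm : (PySem.List.sorted l id).Perm l := PySem.List.sorted_perm l id false
  have hpair : (PySem.List.sorted l id).Pairwise (· ≤ ·) := by
    simpa using PySem.List.sorted_pairwise l id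
  rcases hs : PySem.List.sorted l id with _ | ⟨c, rest⟩
  · rw [hs] at hperm
    have : l = [] := hperm.symm.eq_nil
    simp [this, runLens]
  · rw [hs] at hperm hpair
    rw [runLens, go_mem rest c 1 n hpair]
    constructor
    · rintro (h | ⟨d, hd, hne, h⟩)
      · exact ⟨c, hperm.mem_iff.mp List.mem_cons_self,
          by rw [← hperm.count_eq]; simp [List.count_cons]; omega⟩
      · exact ⟨d, hperm.mem_iff.mp (List.mem_cons_of_mem _ hd),
          by rw [← hperm.count_eq]; simp [List.count_cons, hne, Ne.symm hne, h]⟩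
    · rintro ⟨e, he, hcount⟩
      rw [← hperm.count_eq] at hcount
      rcases List.mem_cons.mp (hperm.mem_iff.mpr he) with rfl | he'
      · left; simp [List.count_cons] at hcount; omega
      · by_cases hec : e = c
        · subst hec; left; simp [List.count_cons] at hcount; omega
        · right
          exact ⟨e, he', hec, by simp [List.count_cons, hec, Ne.symm hec] at hcount; exact hcount.symm⟩

-- the two per-word tests agree
lemma cond_iff (l : List Char) (n : Nat) :
    ((n : Int) ∈ (PySem.Dict.counter l).values) ↔
      (n ∈ PySem.Set.ofList (runLens (PySem.List.sorted l id))) := by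
  rw [counter_values_mem, PySem.Set.mem_ofList, runLens_mem]

-- ===== VERDICT (by name: the statement is the Claim_ definition above) =====
theorem part1_spec : Claim_equal_part1 := by
  intro data _
  unfold Spec_part1 part1 part1_alt
  have hstep :
      (fun (st : Int × Int) (entry : String) =>
        let counter := PySem.Dict.counter entry.toList
        let st1 := if (3 : Int) ∈ counter.values then (st.1, st.2 + 1) else st
        let st2 := if (2 : Int) ∈ counter.values then (st1.1 + 1, st1.2) else st1
        st2)
      = (fun (st : Int × Int) (entry : String) =>
        let s := PySem.List.sorted entry.toList id
        let lengths := PySem.Set.ofList (runLens s)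
        let tw := if 2 ∈ lengths then st.1 + 1 else st.1
        let th := if 3 ∈ lengths then st.2 + 1 else st.2
        (tw, th)) := by
    funext st entry
    have h2 : ((2 : Int) ∈ (PySem.Dict.counter entry.toList).values) ↔
        (2 ∈ PySem.Set.ofList (runLens (PySem.List.sorted entry.toList id))) := by
      have h := cond_iff entry.toList 2
      rwa [show (((2 : Nat) : Int)) = (2 : Int) by norm_num] at h
    have h3 : ((3 : Int) ∈ (PySem.Dict.counter entry.toList).values) ↔
        (3 ∈ PySem.Set.ofList (runLens (PySem.List.sorted entry.toList id))) := by
      have h := cond_iff entry.toList 3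
      rwa [show (((3 : Nat) : Int)) = (3 : Int) by norm_num] at h
    simp only [h2, h3]
    split_ifs <;> rfl
  rw [hstep]
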